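-- pv_equiv track=rewrite | github.com/thordin9/lucidity-mcp | lucidity/tools/code_analysis.py | extract_code_from_diff
-- ===== SOURCE A (Python) =====
-- from typing import Any
--
-- def extract_code_from_diff(diff_info: dict[str, Any]) -> tuple[str, str]:
--     """Extract the original and modified code from diff info.
--
--     Args:
--         diff_info: Dictionary containing diff information
--
--     Returns:
--         Tuple of (original_code, modified_code)
--     """
--     original_lines = []
--     modified_lines = []
--
--     # Process the diff content
--     for line in diff_info["content"].split("\n"):
--         if line.startswith("+") and not line.startswith("+++"):
--             # Line added
--             modified_lines.append(line[1:])
--         elif line.startswith("-") and not line.startswith("---"):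
--             # Line removed
--             original_lines.append(line[1:])
--         elif line.startswith(" "):
--             # Line unchanged
--             original_lines.append(line[1:])
--             modified_lines.append(line[1:])
--
--     return "\n".join(original_lines), "\n".join(modified_lines)
-- ===== SOURCE B (Python) =====
-- def extract_code_from_diff(diff_info: dict) -> tuple:
--     """Extract original/modified code by one indexed scan over the raw diff text:
--     no split(), no intermediate line lists, no join() — line boundaries are found
--     with find(), lines are classified in place with indexed startswith, and the
--     selected bodies are appended directly to two string accumulators."""
--     s = diff_info["content"]
--     orig = ""
--     mod = ""
--     first_o = True
--     first_m = True
--     i = 0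
--     n = len(s)
--     while True:
--         j = s.find("\n", i)
--         end = n if j < 0 else j
--         body = s[i + 1:end]
--         if s.startswith("+", i) and not s.startswith("+++", i):
--             mod = body if first_m else mod + "\n" + body
--             first_m = False
--         elif s.startswith("-", i) and not s.startswith("---", i):
--             orig = body if first_o else orig + "\n" + body
--             first_o = False
--         elif s.startswith(" ", i):
--             orig = body if first_o else orig + "\n" + body
--             first_o = False
--             mod = body if first_m else mod + "\n" + body
--             first_m = False
--         if j < 0:
--             break
--         i = j + 1
--     return orig, mod
-- ===== Notes on version B (the rewrite author's own statement) =====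
-- stated objective: alternative
-- what changed: Replaces split-into-lines + two list accumulators + join with a single indexed scan over the raw text: line boundaries found with find(), lines classified in place with indexed startswith, selected bodies appended directly to two string accumulators guarded by first-emission flags (no split, no intermediate lists, no join).
import Mathlib
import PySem

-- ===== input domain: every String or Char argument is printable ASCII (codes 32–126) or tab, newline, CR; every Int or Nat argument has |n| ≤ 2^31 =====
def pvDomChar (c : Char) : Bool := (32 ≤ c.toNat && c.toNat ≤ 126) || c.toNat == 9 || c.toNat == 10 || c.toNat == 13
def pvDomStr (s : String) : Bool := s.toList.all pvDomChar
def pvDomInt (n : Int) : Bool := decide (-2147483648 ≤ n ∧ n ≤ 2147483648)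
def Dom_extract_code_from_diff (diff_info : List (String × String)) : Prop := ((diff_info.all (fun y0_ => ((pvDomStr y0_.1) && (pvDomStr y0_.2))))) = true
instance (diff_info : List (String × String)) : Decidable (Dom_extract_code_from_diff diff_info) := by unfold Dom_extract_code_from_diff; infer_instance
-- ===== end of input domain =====

-- One honest line: B replaces A's split-into-lines / two-list-accumulator / join pass with a
-- single indexed scan over the raw text that appends selected line bodies directly to two
-- string accumulators (objective: alternative); same return value on Pre_.

-- ===== PORT A =====
-- diff_info["content"]: first-match lookup in the association list (KeyError = none, excluded by Pre_)
def extract_code_from_diff (diff_info : List (String × String)) : String × String :=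
  match diff_info.find? (fun p => p.1 == "content") with
  | none => ("", "")   -- Python raises KeyError here; excluded by Pre_
  | some p =>
    let lines := (PySem.Str.split? p.2 "\n").getD []   -- sep "\n" ≠ "": split? is always `some` here
    let st := lines.foldl (fun (acc : List String × List String) line =>
      if PySem.Str.startswith line "+" && !(PySem.Str.startswith line "+++") then
        (acc.1, acc.2 ++ [PySem.Str.slice line (some 1) none])
      else if PySem.Str.startswith line "-" && !(PySem.Str.startswith line "---") then
        (acc.1 ++ [PySem.Str.slice line (some 1) none], acc.2)
      else if PySem.Str.startswith line " " then
        (acc.1 ++ [PySem.Str.slice line (some 1) none],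
         acc.2 ++ [PySem.Str.slice line (some 1) none])
      else acc) ([], [])
    (PySem.Str.join "\n" st.1, PySem.Str.join "\n" st.2)

-- ===== PORT B =====
-- Source B's while loop over the line-start index i, transliterated as recursion on the suffix of
-- the text starting at i (cs = s[i:]); j = s.find("\n", i) means the line is cs.takeWhile (≠ '\n'),
-- body = s[i+1:end] is that line minus its first char, and the loop continues on the suffix after
-- the found '\n' (cs.drop line.length = "" ⇔ j < 0, the break). s.startswith(pat, i) is
-- PySem.Chars.startswith cs pat. State (orig, mod, first_o, first_m) is Source B's four variables.
def pvScan (cs orig mod : List Char) (fo fm : Bool) : List Char × List Char :=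
  let line := cs.takeWhile (fun c => c ≠ '\n')
  let body := line.drop 1
  let st :=
    if PySem.Chars.startswith cs ['+'] && !(PySem.Chars.startswith cs ['+','+','+']) then
      (orig, (if fm then body else mod ++ '\n' :: body), fo, false)
    else if PySem.Chars.startswith cs ['-'] && !(PySem.Chars.startswith cs ['-','-','-']) then
      ((if fo then body else orig ++ '\n' :: body), mod, false, fm)
    else if PySem.Chars.startswith cs [' '] then
      ((if fo then body else orig ++ '\n' :: body),
       (if fm then body else mod ++ '\n' :: body), false, false)
    else (orig, mod, fo, fm)
  match h : cs.drop (cs.takeWhile (fun c => c ≠ '\n')).length with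
  | [] => (st.1, st.2.1)                                   -- j < 0: break, return
  | _ :: r => pvScan r st.1 st.2.1 st.2.2.1 st.2.2.2       -- i = j + 1
termination_by cs.length
decreasing_by
  have h2 := congrArg List.length h
  simp [List.length_drop] at h2
  omega

def extract_code_from_diff_alt (diff_info : List (String × String)) : String × String :=
  match diff_info.find? (fun p => p.1 == "content") with
  | none => ("", "")   -- KeyError; excluded by Pre_
  | some p =>
    let r := pvScan p.2.toList [] [] true true
    (String.ofList r.1, String.ofList r.2)

-- ===== PRECONDITION & SPEC =====
-- Pre_ excludes exactly the inputs with no "content" key, on which A raises KeyError.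
def Pre_extract_code_from_diff (diff_info : List (String × String)) : Prop :=
  "content" ∈ diff_info.map (·.1)
instance (diff_info : List (String × String)) : Decidable (Pre_extract_code_from_diff diff_info) := by unfold Pre_extract_code_from_diff; infer_instance
def pvWitness_extract_code_from_diff : (List (String × String)) := [("content", " a\n-b\n+c")]

def Spec_extract_code_from_diff (diff_info : List (String × String)) (out : String × String) : Prop := out = extract_code_from_diff_alt diff_info
instance (diff_info : List (String × String)) (out : String × String) : Decidable (Spec_extract_code_from_diff diff_info out) := by unfold Spec_extract_code_from_diff; infer_instance

-- ===== CLAIM (what is proved, stated in full; the proofs are below) =====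
def Claim_equal_extract_code_from_diff : Prop := ∀ (diff_info : List (String × String)), Dom_extract_code_from_diff diff_info → Pre_extract_code_from_diff diff_info → Spec_extract_code_from_diff diff_info (extract_code_from_diff diff_info)

-- ===== LEMMAS AND PROOFS =====

-- proof-side helpers: the line decomposition B's scan walks through, and A's per-line data
def pvLines (cs : List Char) : List (List Char) :=
  let line := cs.takeWhile (fun c => c ≠ '\n')
  match h : cs.drop (cs.takeWhile (fun c => c ≠ '\n')).length with
  | [] => [line]
  | _ :: r => line :: pvLines r
termination_by cs.length
decreasing_by
  have h2 := congrArg List.length h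
  simp [List.length_drop] at h2
  omega

def pvConsHead (p : List Char) : List (List Char) → List (List Char)
  | [] => [p]
  | x :: xs => (p ++ x) :: xs

def pcO (l : List Char) : Bool :=
  (PySem.Chars.startswith l ['-'] && !(PySem.Chars.startswith l ['-','-','-'])) || PySem.Chars.startswith l [' ']
def pcM (l : List Char) : Bool :=
  (PySem.Chars.startswith l ['+'] && !(PySem.Chars.startswith l ['+','+','+'])) || PySem.Chars.startswith l [' ']

def pvEmit (bf : List Char × Bool) (p : List Char) : List Char × Bool :=
  (if bf.2 then p else bf.1 ++ '\n' :: p, false)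

-- string versions of the predicates, for A's side
def pvPO (l : String) : Bool :=
  (PySem.Str.startswith l "-" && !(PySem.Str.startswith l "---")) || PySem.Str.startswith l " "
def pvPM (l : String) : Bool :=
  (PySem.Str.startswith l "+" && !(PySem.Str.startswith l "+++")) || PySem.Str.startswith l " "
def pvSl (l : String) : String := PySem.Str.slice l (some 1) none

-- two distinct single-char prefixes exclude each other
theorem sw_excl (l : List Char) (c d : Char) (h : c ≠ d)
    (h1 : PySem.Chars.startswith l [c] = true) : PySem.Chars.startswith l [d] = false := by
  rw [PySem.Chars.startswith_iff] at h1
  rcases l with _ | ⟨a, t⟩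
  · simp at h1
  · simp [List.cons_prefix_iff] at h1
    subst h1
    rw [← Bool.not_eq_true, PySem.Chars.startswith_iff]
    simp [List.cons_prefix_iff]
    intro hd
    exact h hd

-- A's loop body rewritten with the predicates
theorem step_eq (acc : List String × List String) (line : String) :
    (if PySem.Str.startswith line "+" && !(PySem.Str.startswith line "+++") then
        (acc.1, acc.2 ++ [PySem.Str.slice line (some 1) none])
      else if PySem.Str.startswith line "-" && !(PySem.Str.startswith line "---") then
        (acc.1 ++ [PySem.Str.slice line (some 1) none], acc.2)
      else if PySem.Str.startswith line " " then
        (acc.1 ++ [PySem.Str.slice line (some 1) none],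
         acc.2 ++ [PySem.Str.slice line (some 1) none])
      else acc)
    = (acc.1 ++ (if pvPO line then [pvSl line] else []),
       acc.2 ++ (if pvPM line then [pvSl line] else [])) := by
  by_cases h1 : PySem.Chars.startswith line.toList ['+'] = true
  · have h2 := sw_excl line.toList '+' '-' (by decide) h1
    have h3 := sw_excl line.toList '+' ' ' (by decide) h1
    by_cases h4 : PySem.Chars.startswith line.toList ['+', '+', '+'] = true
    · simp [pvPO, pvPM, pvSl, h1, h2, h3, h4]
    · simp at h4
      simp [pvPO, pvPM, pvSl, h1, h2, h3, h4]
  · simp at h1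
    by_cases h2 : PySem.Chars.startswith line.toList ['-'] = true
    · have h3 := sw_excl line.toList '-' ' ' (by decide) h2
      by_cases h4 : PySem.Chars.startswith line.toList ['-', '-', '-'] = true
      · simp [pvPO, pvPM, pvSl, h1, h2, h3, h4]
      · simp at h4
        simp [pvPO, pvPM, pvSl, h1, h2, h3, h4]
    · simp at h2
      by_cases h3 : PySem.Chars.startswith line.toList [' '] = true
      · simp [pvPO, pvPM, pvSl, h1, h2, h3]
      · simp at h3
        simp [pvPO, pvPM, pvSl, h1, h2, h3]

-- A's interleaved fold computes the two filtered projections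
theorem foldl_eq (lines : List String) (acc : List String × List String) :
    lines.foldl (fun (acc : List String × List String) line =>
      if PySem.Str.startswith line "+" && !(PySem.Str.startswith line "+++") then
        (acc.1, acc.2 ++ [PySem.Str.slice line (some 1) none])
      else if PySem.Str.startswith line "-" && !(PySem.Str.startswith line "---") then
        (acc.1 ++ [PySem.Str.slice line (some 1) none], acc.2)
      else if PySem.Str.startswith line " " then
        (acc.1 ++ [PySem.Str.slice line (some 1) none],
         acc.2 ++ [PySem.Str.slice line (some 1) none])
      else acc) acc
    = (acc.1 ++ (lines.filter pvPO).map pvSl, acc.2 ++ (lines.filter pvPM).map pvSl) := by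
  induction lines generalizing acc with
  | nil => simp
  | cons l rest ih =>
    rw [List.foldl_cons, step_eq, ih]
    by_cases hO : pvPO l = true <;> by_cases hM : pvPM l = true <;>
      simp [hO, hM]

-- pvLines is never empty
theorem pvLines_ne_nil (cs : List Char) : pvLines cs ≠ [] := by
  rw [pvLines]
  split <;> simp

theorem consHead_nil (L : List (List Char)) (h : L ≠ []) : pvConsHead [] L = L := by
  cases L with
  | nil => exact absurd rfl h
  | cons x xs => simp [pvConsHead]

theorem consHead_consHead (a b : List Char) (L : List (List Char)) :
    pvConsHead a (pvConsHead b L) = pvConsHead (a ++ b) L := by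
  cases L <;> simp [pvConsHead]

-- prepending a non-newline char extends the first line
theorem pvLines_cons (c : Char) (rest : List Char) (hc : c ≠ '\n') :
    pvLines (c :: rest) = pvConsHead [c] (pvLines rest) := by
  rw [pvLines, pvLines]
  have hsc : List.drop ((c :: rest).takeWhile (fun x => decide ¬ x = '\n')).length (c :: rest)
      = List.drop (rest.takeWhile (fun x => decide ¬ x = '\n')).length rest := by
    simp [List.takeWhile_cons, hc]
  split
  · rename_i heq1
    rw [hsc] at heq1
    split
    · simp [pvConsHead, List.takeWhile_cons, hc]
    · rename_i heq2
      rw [heq2] at heq1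
      simp at heq1
  · rename_i x1 r1 heq1
    rw [hsc] at heq1
    split
    · rename_i heq2
      rw [heq2] at heq1
      simp at heq1
    · rename_i x2 r2 heq2
      rw [heq2] at heq1
      injection heq1 with hx hr
      subst hr
      simp [pvConsHead, List.takeWhile_cons, hc]

-- a leading newline opens an empty first line
theorem pvLines_newline (rest : List Char) : pvLines ('\n' :: rest) = [] :: pvLines rest := by
  rw [pvLines]
  split
  · rename_i heq
    simp at heq
  · rename_i head r heq
    simp only [List.takeWhile_cons, decide_not] at heq
    simp at heq
    obtain ⟨h1, h2⟩ := heq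
    subst h2
    simp

-- splitOn with fuel computes pvLines
theorem go_lines (fuel : Nat) : ∀ (cs cur : List Char) (acc : List (List Char)),
    cs.length ≤ fuel →
    PySem.Chars.splitOn.go ['\n'] fuel cs cur acc
      = acc.reverse ++ pvConsHead cur.reverse (pvLines cs) := by
  induction fuel with
  | zero =>
    intro cs cur acc h
    have : cs = [] := List.eq_nil_of_length_eq_zero (Nat.le_zero.mp h)
    subst this
    rw [PySem.Chars.splitOn.go.eq_def]
    simp [pvLines, pvConsHead]
  | succ fuel ih =>
    intro cs cur acc h
    cases cs with
    | nil =>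
      rw [PySem.Chars.splitOn.go.eq_def]
      simp [pvLines, pvConsHead]
    | cons c rest =>
      rw [PySem.Chars.splitOn.go.eq_def]
      simp only [List.length_cons] at h
      by_cases hc : c = '\n'
      · subst hc
        simp only [List.isPrefixOf, beq_self_eq_true, Bool.and_self, if_pos,
          List.length_singleton, List.drop_succ_cons, List.drop_zero]
        rw [ih rest [] (List.reverse cur :: acc) (by omega)]
        rw [pvLines_newline]
        simp only [List.reverse_nil]
        rw [consHead_nil _ (pvLines_ne_nil rest)]
        simp [pvConsHead]
      · have hpre : List.isPrefixOf ['\n'] (c :: rest) = false := by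
          simp [List.isPrefixOf]
          exact fun hh => absurd hh.symm hc
        simp only [hpre, Bool.false_eq_true, if_neg, if_false]
        rw [ih rest (c :: cur) acc (by omega)]
        rw [pvLines_cons c rest hc]
        rw [consHead_consHead]
        simp

theorem splitOn_lines (cs : List Char) :
    PySem.Chars.splitOn cs ['\n'] = pvLines cs := by
  rw [PySem.Chars.splitOn]
  rw [go_lines (cs.length + 1) cs [] [] (by omega)]
  simp [consHead_nil _ (pvLines_ne_nil cs)]

-- a pattern with no newline reads the same on the suffix and on its first line
theorem sw_takeWhile (p : List Char) (hp : '\n' ∉ p) : ∀ cs : List Char,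
    PySem.Chars.startswith cs p
      = PySem.Chars.startswith (cs.takeWhile (fun c => c ≠ '\n')) p := by
  induction p with
  | nil => intro cs; simp [PySem.Chars.startswith, List.isPrefixOf]
  | cons a p' ih =>
    intro cs
    have ha : a ≠ '\n' := fun h => hp (h ▸ List.mem_cons_self)
    have hp' : '\n' ∉ p' := fun h => hp (List.mem_cons_of_mem _ h)
    cases cs with
    | nil => simp [PySem.Chars.startswith, List.isPrefixOf]
    | cons c rest =>
      by_cases hc : c = '\n'
      · subst hc
        simp [PySem.Chars.startswith, List.isPrefixOf, List.takeWhile_cons]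
        exact fun hh => absurd hh ha
      · simp only [PySem.Chars.startswith, List.isPrefixOf, List.takeWhile_cons, hc, ne_eq,
          not_false_iff, decide_true, if_pos]
        have := ih hp' rest
        simp [PySem.Chars.startswith] at this
        simp only [ne_eq, decide_not] at this ⊢
        rw [this]

-- the emission fold with an empty buffer and a raised first-flag is "\n".join
theorem emit_false (ps : List (List Char)) : ∀ b : List Char,
    (ps.foldl pvEmit (b, false)).1 = b ++ ps.flatMap (fun q => '\n' :: q) := by
  induction ps with
  | nil => intro b; simp
  | cons q ps ih =>
    intro b
    simp only [List.foldl_cons, pvEmit, if_neg, Bool.false_eq_true, List.flatMap_cons]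
    rw [ih]
    simp

theorem join_flat (ps : List (List Char)) : ∀ p : List Char,
    PySem.Chars.join ['\n'] (p :: ps) = p ++ ps.flatMap (fun q => '\n' :: q) := by
  induction ps with
  | nil => intro p; simp [PySem.Chars.join_singleton]
  | cons q ps ih =>
    intro p
    rw [PySem.Chars.join_cons_cons, ih q]
    simp

theorem emit_join (ps : List (List Char)) :
    (ps.foldl pvEmit ([], true)).1 = PySem.Chars.join ['\n'] ps := by
  cases ps with
  | nil => simp [PySem.Chars.join_nil]
  | cons p ps =>
    have h1 : pvEmit ([], true) p = (p, false) := by simp [pvEmit]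
    rw [List.foldl_cons, h1, emit_false, join_flat]

-- B's scan computes the emission fold of the two filtered line-body lists
theorem scan_eq (n : Nat) : ∀ (cs : List Char), cs.length ≤ n →
    ∀ (orig mod : List Char) (fo fm : Bool),
    pvScan cs orig mod fo fm
      = ( ((((pvLines cs).filter pcO).map (fun l => l.drop 1)).foldl pvEmit (orig, fo)).1,
          ((((pvLines cs).filter pcM).map (fun l => l.drop 1)).foldl pvEmit (mod, fm)).1 ) := by
  induction n with
  | zero =>
    intro cs h
    have : cs = [] := List.eq_nil_of_length_eq_zero (Nat.le_zero.mp h)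
    subst this
    intro orig mod fo fm
    rw [pvScan, pvLines]
    simp [PySem.Chars.startswith, List.isPrefixOf, pcO, pcM, pvEmit]
  | succ n ih =>
    intro cs h orig mod fo fm
    rw [pvScan, pvLines]
    -- rewrite the suffix classification into first-line classification
    have e1 := sw_takeWhile ['+'] (by decide) cs
    have e2 := sw_takeWhile ['+','+','+'] (by decide) cs
    have e3 := sw_takeWhile ['-'] (by decide) cs
    have e4 := sw_takeWhile ['-','-','-'] (by decide) cs
    have e5 := sw_takeWhile [' '] (by decide) cs
    rw [e1, e2, e3, e4, e5]
    set line := cs.takeWhile (fun c => c ≠ '\n') with hline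
    have hrec : ∀ r : List Char, cs.drop line.length = '\n' :: r → r.length ≤ n → True := fun _ _ _ => trivial
    split
    · -- last line: result is one classification step on (orig,fo)/(mod,fm)
      by_cases h1 : PySem.Chars.startswith line ['+'] = true
      · have h2 := sw_excl line '+' '-' (by decide) h1
        have h3 := sw_excl line '+' ' ' (by decide) h1
        by_cases h4 : PySem.Chars.startswith line ['+','+','+'] = true
        · simp [pcO, pcM, h1, h2, h3, h4, pvEmit]
        · simp [pcO, pcM, h1, h2, h3, h4, pvEmit]
      · simp at h1
        by_cases h2 : PySem.Chars.startswith line ['-'] = true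
        · have h3 := sw_excl line '-' ' ' (by decide) h2
          by_cases h4 : PySem.Chars.startswith line ['-','-','-'] = true
          · simp [pcO, pcM, h1, h2, h3, h4, pvEmit]
          · simp [pcO, pcM, h1, h2, h3, h4, pvEmit]
        · simp at h2
          by_cases h3 : PySem.Chars.startswith line [' '] = true
          · simp [pcO, pcM, h1, h2, h3, pvEmit]
          · simp at h3
            simp [pcO, pcM, h1, h2, h3, pvEmit]
    · -- a '\n' was found: recurse on the tail
      rename_i x r hdrop
      have hr : r.length ≤ n := by
        have h2 := congrArg List.length hdrop
        simp [List.length_drop] at h2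
        omega
      rw [ih r hr]
      by_cases h1 : PySem.Chars.startswith line ['+'] = true
      · have h2 := sw_excl line '+' '-' (by decide) h1
        have h3 := sw_excl line '+' ' ' (by decide) h1
        by_cases h4 : PySem.Chars.startswith line ['+','+','+'] = true
        · simp [pcO, pcM, h1, h2, h3, h4, pvEmit]
        · simp [pcO, pcM, h1, h2, h3, h4, pvEmit]
      · simp at h1
        by_cases h2 : PySem.Chars.startswith line ['-'] = true
        · have h3 := sw_excl line '-' ' ' (by decide) h2
          by_cases h4 : PySem.Chars.startswith line ['-','-','-'] = true
          · simp [pcO, pcM, h1, h2, h3, h4, pvEmit]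
          · simp [pcO, pcM, h1, h2, h3, h4, pvEmit]
        · simp at h2
          by_cases h3 : PySem.Chars.startswith line [' '] = true
          · simp [pcO, pcM, h1, h2, h3, pvEmit]
          · simp at h3
            simp [pcO, pcM, h1, h2, h3, pvEmit]

-- string-level ↔ char-level bridges
theorem pvPO_ofList (l : List Char) : pvPO (String.ofList l) = pcO l := by
  simp [pvPO, pcO, PySem.Str.startswith]
theorem pvPM_ofList (l : List Char) : pvPM (String.ofList l) = pcM l := by
  simp [pvPM, pcM, PySem.Str.startswith]
theorem pvSl_ofList (l : List Char) : pvSl (String.ofList l) = String.ofList (l.drop 1) := by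
  simp [pvSl, PySem.Str.slice, PySem.Chars.slice, PySem.List.slice_from (a := 1) l (by omega)]

theorem joinS_eq (Y : List (List Char)) :
    PySem.Str.join "\n" (Y.map String.ofList) = String.ofList (PySem.Chars.join ['\n'] Y) := by
  simp [PySem.Str.join, List.map_map, Function.comp_def]

theorem split_lines (s : String) :
    (PySem.Str.split? s "\n").getD [] = (pvLines s.toList).map String.ofList := by
  have : ("\n" : String).toList = ['\n'] := rfl
  simp [PySem.Str.split?, PySem.Chars.split?, this, splitOn_lines]

theorem filtered_eq (s : String) (P : String → Bool) (pc : List Char → Bool)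
    (hP : ∀ l : List Char, P (String.ofList l) = pc l) :
    ((((PySem.Str.split? s "\n").getD []).filter P).map pvSl)
      = (((pvLines s.toList).filter pc).map (fun l => l.drop 1)).map String.ofList := by
  rw [split_lines, List.filter_map]
  simp only [Function.comp_def, hP]
  rw [List.map_map, List.map_map]
  simp [Function.comp_def, pvSl_ofList]

theorem extract_main : ∀ d, extract_code_from_diff d = extract_code_from_diff_alt d := by
  intro d
  unfold extract_code_from_diff extract_code_from_diff_alt
  cases d.find? (fun p => p.1 == "content") with
  | none => rfl
  | some p =>
    simp only [foldl_eq, List.nil_append]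
    rw [scan_eq p.2.toList.length p.2.toList (le_refl _)]
    rw [filtered_eq p.2 pvPO pcO pvPO_ofList, filtered_eq p.2 pvPM pcM pvPM_ofList]
    rw [joinS_eq, joinS_eq, emit_join, emit_join]

-- ===== VERDICT (by name: the statement is the Claim_ definition above) =====
theorem extract_code_from_diff_spec : Claim_equal_extract_code_from_diff := by
  intro d _ _
  unfold Spec_extract_code_from_diff
  exact extract_main d
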